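-- pv_equiv track=rewrite | github.com/COSC-499-W2025/capstone-project-team-19 | src/menu/resume/helpers.py | _filter_skills_by_highlighted
-- ===== SOURCE A (Python) =====
-- from typing import List, Dict, Any
-- from typing import Any, Dict, List
--
-- def _filter_skills_by_highlighted(
--     skills: List[str],
--     highlighted_skills: List[str],
--     order_by_highlighted: bool = False,
-- ) -> List[str]:
--     """Filter display skills by the raw highlighted skill names.
--
--     Maps display labels back to raw names for comparison.
--     """
--     # Build reverse mapping from display label to raw name
--     tech_skill_map = {
--         "architecture_and_design": "Architecture & design",
--         "data_structures": "Data structures",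
--         "frontend_skills": "Frontend development",
--         "object_oriented_programming": "Object-oriented programming",
--         "security_and_error_handling": "Security & error handling",
--         "testing_and_ci": "Testing & CI",
--         "algorithms": "Algorithms",
--         "backend_development": "Backend development",
--         "clean_code_and_quality": "Clean code & quality",
--         "devops_and_ci_cd": "DevOps & CI/CD",
--         "api_and_backend": "API & backend",
--     }
--     writing_skill_map = {
--         "clarity": "Clear communication",
--         "structure": "Structured writing",
--         "vocabulary": "Strong vocabulary",
--         "argumentation": "Analytical writing",
--         "depth": "Critical thinking",
--         "process": "Revision & editing",
--         "planning": "Planning & organization",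
--         "research": "Research integration",
--         "data_collection": "Data collection",
--         "data_analysis": "Data analysis",
--     }
--
--     # Build reverse: display_label -> raw_name
--     label_to_raw = {}
--     for raw, label in tech_skill_map.items():
--         label_to_raw[label] = raw
--     for raw, label in writing_skill_map.items():
--         label_to_raw[label] = raw
--
--     if not order_by_highlighted:
--         filtered = []
--         for skill in skills:
--             raw_name = label_to_raw.get(skill, skill)
--             if raw_name in highlighted_skills:
--                 filtered.append(skill)
--         return filtered
--
--     order_index = {raw: idx for idx, raw in enumerate(highlighted_skills)}
--     ordered: List[tuple[int, str]] = []
--     seen: set[str] = set()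
--     for skill in skills:
--         raw_name = label_to_raw.get(skill, skill)
--         idx = order_index.get(raw_name)
--         if idx is None or skill in seen:
--             continue
--         seen.add(skill)
--         ordered.append((idx, skill))
--     ordered.sort(key=lambda item: item[0])
--     return [skill for _idx, skill in ordered]
-- ===== SOURCE B (Python) =====
-- def _filter_skills_by_highlighted(
--     skills,
--     highlighted_skills,
--     order_by_highlighted=False,
-- ):
--     """Filter display skills by the raw highlighted skill names.
--
--     Ordering branch emits results by walking an index table (buckets in
--     ascending highlighted-index order) instead of decorate-sort.
--     """
--     tech_skill_map = {
--         "architecture_and_design": "Architecture & design",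
--         "data_structures": "Data structures",
--         "frontend_skills": "Frontend development",
--         "object_oriented_programming": "Object-oriented programming",
--         "security_and_error_handling": "Security & error handling",
--         "testing_and_ci": "Testing & CI",
--         "algorithms": "Algorithms",
--         "backend_development": "Backend development",
--         "clean_code_and_quality": "Clean code & quality",
--         "devops_and_ci_cd": "DevOps & CI/CD",
--         "api_and_backend": "API & backend",
--     }
--     writing_skill_map = {
--         "clarity": "Clear communication",
--         "structure": "Structured writing",
--         "vocabulary": "Strong vocabulary",
--         "argumentation": "Analytical writing",
--         "depth": "Critical thinking",
--         "process": "Revision & editing",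
--         "planning": "Planning & organization",
--         "research": "Research integration",
--         "data_collection": "Data collection",
--         "data_analysis": "Data analysis",
--     }
--     label_to_raw = {}
--     for raw, label in tech_skill_map.items():
--         label_to_raw[label] = raw
--     for raw, label in writing_skill_map.items():
--         label_to_raw[label] = raw
--
--     if not order_by_highlighted:
--         return [s for s in skills if label_to_raw.get(s, s) in highlighted_skills]
--
--     # last occurrence wins, exactly like a dict comprehension over enumerate
--     order_index = {raw: idx for idx, raw in enumerate(highlighted_skills)}
--     deduped = []
--     seen = set()
--     for s in skills:
--         if label_to_raw.get(s, s) in order_index and s not in seen: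
--             seen.add(s)
--             deduped.append(s)
--     return [s for i in range(len(highlighted_skills)) for s in deduped
--             if order_index.get(label_to_raw.get(s, s)) == i]
-- ===== Notes on version B (the rewrite author's own statement) =====
-- stated objective: alternative
-- what changed: The ordering branch no longer decorate-sorts (idx, skill) pairs: B dedups the highlighted skills in one pass and then emits output by walking the highlighted-index buckets 0..len(highlighted_skills)-1 in ascending order, keeping original skills order within a bucket; the filter branch becomes a comprehension.
import Mathlib
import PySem

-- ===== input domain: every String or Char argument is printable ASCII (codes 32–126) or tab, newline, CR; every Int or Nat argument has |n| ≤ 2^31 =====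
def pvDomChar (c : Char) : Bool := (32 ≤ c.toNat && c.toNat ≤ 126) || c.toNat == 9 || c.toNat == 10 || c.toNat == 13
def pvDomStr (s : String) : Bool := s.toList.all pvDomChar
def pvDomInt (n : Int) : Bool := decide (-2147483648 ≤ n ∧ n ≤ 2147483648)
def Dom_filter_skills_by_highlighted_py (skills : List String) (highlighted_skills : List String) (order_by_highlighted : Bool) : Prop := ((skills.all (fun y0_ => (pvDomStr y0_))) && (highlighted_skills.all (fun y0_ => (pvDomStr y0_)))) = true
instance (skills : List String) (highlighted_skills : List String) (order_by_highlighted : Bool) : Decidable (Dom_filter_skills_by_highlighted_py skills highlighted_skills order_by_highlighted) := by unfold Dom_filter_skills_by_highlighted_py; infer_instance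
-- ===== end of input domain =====

-- B replaces A's decorate-sort ordering branch by an index-bucket walk (alternative decomposition, similar cost).

-- ===== PORT A =====
-- tech_skill_map / writing_skill_map literals and the label_to_raw build loops (shared verbatim by both Pythons)
def pvTech : List (String × String) :=
  [("architecture_and_design", "Architecture & design"),
   ("data_structures", "Data structures"),
   ("frontend_skills", "Frontend development"),
   ("object_oriented_programming", "Object-oriented programming"),
   ("security_and_error_handling", "Security & error handling"),
   ("testing_and_ci", "Testing & CI"),
   ("algorithms", "Algorithms"),
   ("backend_development", "Backend development"),
   ("clean_code_and_quality", "Clean code & quality"),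
   ("devops_and_ci_cd", "DevOps & CI/CD"),
   ("api_and_backend", "API & backend")]

def pvWriting : List (String × String) :=
  [("clarity", "Clear communication"),
   ("structure", "Structured writing"),
   ("vocabulary", "Strong vocabulary"),
   ("argumentation", "Analytical writing"),
   ("depth", "Critical thinking"),
   ("process", "Revision & editing"),
   ("planning", "Planning & organization"),
   ("research", "Research integration"),
   ("data_collection", "Data collection"),
   ("data_analysis", "Data analysis")]

-- label_to_raw = {}; for raw, label in …: label_to_raw[label] = raw  (both maps)
def pvLabelToRaw : PySem.Dict String String :=
  pvWriting.foldl (fun d p => d.insert p.2 p.1)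
    (pvTech.foldl (fun d p => d.insert p.2 p.1) PySem.Dict.empty)

-- order_index = {raw: idx for idx, raw in enumerate(highlighted_skills)}  (same line in both Pythons)
def pvOrderIndex (hs : List String) : PySem.Dict String Int :=
  (PySem.List.enumerate hs).foldl (fun d p => d.insert p.2 p.1) PySem.Dict.empty

def filter_skills_by_highlighted_py (skills : List String) (highlighted_skills : List String) (order_by_highlighted : Bool) : List String :=
  let ltr := pvLabelToRaw
  if order_by_highlighted = false then
    -- filtered = []; for skill in skills: … append
    skills.foldl (fun acc skill =>
      if highlighted_skills.contains (ltr.getD skill skill) then acc ++ [skill] else acc) []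
  else
    let oi := pvOrderIndex highlighted_skills
    -- ordered/seen loop
    let st := skills.foldl (fun (st : List (Int × String) × PySem.Set String) skill =>
      match oi.get? (ltr.getD skill skill) with
      | none => st
      | some idx => if st.2.contains skill then st else (st.1 ++ [(idx, skill)], st.2.add skill))
      ([], PySem.Set.ofList [])
    -- ordered.sort(key=fst); return [skill for _idx, skill in ordered]
    (PySem.List.sorted st.1 (fun p => p.1)).map (fun p => p.2)

-- ===== PORT B =====
def filter_skills_by_highlighted_py_alt (skills : List String) (highlighted_skills : List String) (order_by_highlighted : Bool) : List String :=
  let ltr := pvLabelToRaw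
  if order_by_highlighted = false then
    -- [s for s in skills if label_to_raw.get(s, s) in highlighted_skills]
    skills.filter (fun s => highlighted_skills.contains (ltr.getD s s))
  else
    let oi := pvOrderIndex highlighted_skills
    -- deduped/seen loop
    let st := skills.foldl (fun (st : List String × PySem.Set String) s =>
      if oi.contains (ltr.getD s s) && !(st.2.contains s) then (st.1 ++ [s], st.2.add s) else st)
      ([], PySem.Set.ofList [])
    -- bucket walk: [s for i in range(len(hs)) for s in deduped if order_index.get(…) == i]
    (PySem.List.pyRange 0 (highlighted_skills.length : Int)).flatMap (fun i =>
      st.1.filter (fun s => oi.get? (ltr.getD s s) == some i))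

-- ===== PRECONDITION & SPEC =====
def Spec_filter_skills_by_highlighted_py (skills : List String) (highlighted_skills : List String) (order_by_highlighted : Bool) (out : List String) : Prop := out = filter_skills_by_highlighted_py_alt skills highlighted_skills order_by_highlighted
instance (skills : List String) (highlighted_skills : List String) (order_by_highlighted : Bool) (out : List String) : Decidable (Spec_filter_skills_by_highlighted_py skills highlighted_skills order_by_highlighted out) := by unfold Spec_filter_skills_by_highlighted_py; infer_instance

-- ===== CLAIM (what is proved, stated in full; the proofs are below) =====
def Claim_equal_filter_skills_by_highlighted_py : Prop := ∀ (skills : List String) (highlighted_skills : List String) (order_by_highlighted : Bool), Dom_filter_skills_by_highlighted_py skills highlighted_skills order_by_highlighted → Spec_filter_skills_by_highlighted_py skills highlighted_skills order_by_highlighted (filter_skills_by_highlighted_py skills highlighted_skills order_by_highlighted)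

-- ===== LEMMAS AND PROOFS =====

-- Dict.contains is get?.isSome
lemma pv_contains_eq_isSome {ν : Type} (d : PySem.Dict String ν) (k : String) :
    d.contains k = (d.get? k).isSome := by
  obtain ⟨items⟩ := d
  induction items with
  | nil => simp [PySem.Dict.contains, PySem.Dict.get?]
  | cons p t ih =>
      by_cases hp : p.1 == k
      · simp [PySem.Dict.contains, PySem.Dict.get?, List.find?, hp]
      · simpa [PySem.Dict.contains, PySem.Dict.get?, List.find?, hp] using ih

-- an enumerate entry carries an index start + j with j below the list length
lemma pv_mem_enumerate {α : Type} : ∀ (xs : List α) (s : Int) (p : Int × α),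
    p ∈ PySem.List.enumerate xs s → ∃ j : Nat, j < xs.length ∧ p.1 = s + (j : Int)
  | [], s, p, h => by simp [PySem.List.enumerate] at h
  | x :: t, s, p, h => by
      simp [PySem.List.enumerate] at h
      rcases h with h | h
      · exact ⟨0, by simp, by simp [h]⟩
      · obtain ⟨j, hj, hp⟩ := pv_mem_enumerate t (s + 1) p h
        exact ⟨j + 1, by simpa using hj, by push_cast; omega⟩

-- values of an insert-fold all satisfy a predicate holding on the source pairs
lemma pv_bound_fold {P : Int → Prop} : ∀ (l : List (Int × String)) (d : PySem.Dict String Int),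
    (∀ k v, d.get? k = some v → P v) → (∀ p ∈ l, P p.1) →
    ∀ k v, (l.foldl (fun d p => d.insert p.2 p.1) d).get? k = some v → P v
  | [], d, hd, _, k, v, h => hd k v h
  | p :: t, d, hd, hl, k, v, h => by
      refine pv_bound_fold t (d.insert p.2 p.1) ?_ (fun q hq => hl q (by simp [hq])) k v h
      intro k' v' h'
      rw [PySem.Dict.get?_insert] at h'
      split at h'
      · exact (Option.some_inj.mp h') ▸ hl p (by simp)
      · exact hd k' v' h'

-- every value stored in order_index is an index below highlighted_skills.length
lemma pv_orderIndex_bound (hs : List String) (k : String) (v : Int)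
    (h : (pvOrderIndex hs).get? k = some v) : ∃ j : Nat, j < hs.length ∧ v = (j : Int) := by
  refine pv_bound_fold (P := fun v => ∃ j : Nat, j < hs.length ∧ v = (j : Int)) (PySem.List.enumerate hs) PySem.Dict.empty ?_ ?_ k v h
  · intro k' v' h'
    simp [PySem.Dict.empty, PySem.Dict.get?] at h'
  · intro p hp
    obtain ⟨j, hj, hp1⟩ := pv_mem_enumerate hs 0 p hp
    exact ⟨j, hj, by omega⟩

-- insertBy places x after the non-greater prefix and before the greater suffix
lemma pv_insertBy_append (x : Int × String) : ∀ (l1 l2 : List (Int × String)),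
    (∀ y ∈ l1, ¬ x.1 < y.1) → (∀ y ∈ l2, x.1 < y.1) →
    PySem.List.insertBy (fun a b => decide (a.1 < b.1)) x (l1 ++ l2) = l1 ++ x :: l2
  | [], [], _, _ => by simp [PySem.List.insertBy]
  | [], y :: ys, _, h2 => by
      have : x.1 < y.1 := h2 y (by simp)
      simp [PySem.List.insertBy, this]
  | y :: ys, l2, h1, h2 => by
      have : ¬ x.1 < y.1 := h1 y (by simp)
      simp [PySem.List.insertBy, this]
      exact pv_insertBy_append x ys l2 (fun z hz => h1 z (by simp [hz])) h2

-- the stable sort by Nat-valued Int keys is the ascending concatenation of the key buckets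
lemma pv_sorted_buckets (n : Nat) : ∀ (L : List (Int × String)),
    (∀ p ∈ L, ∃ j : Nat, j < n ∧ p.1 = (j : Int)) →
    PySem.List.sorted L (fun p => p.1) =
      (List.range n).flatMap (fun (j : Nat) => L.filter (fun p => p.1 == (j : Int))) := by
  intro L
  induction L using List.reverseRecOn with
  | nil => intro _; simp [PySem.List.sorted]
  | append_singleton M x ih =>
    intro h
    obtain ⟨k, hk, hxk⟩ := h x (by simp)
    have hM : ∀ p ∈ M, ∃ j : Nat, j < n ∧ p.1 = (j : Int) := fun p hp => h p (by simp [hp])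
    have hsort : PySem.List.sorted (M ++ [x]) (fun p => p.1) =
        PySem.List.insertBy (fun a b => decide (a.1 < b.1)) x (PySem.List.sorted M (fun p => p.1)) := by
      simp [PySem.List.sorted, List.foldl_append]
    rw [hsort, ih hM]
    have hn : n = (k + 1) + (n - (k + 1)) := by omega
    rw [hn, List.range_add, List.flatMap_append, List.flatMap_append]
    rw [pv_insertBy_append x _ _ ?h1 ?h2]
    case h1 =>
      intro y hy
      simp only [List.mem_flatMap, List.mem_range, List.mem_filter] at hy
      obtain ⟨j, hj, _, hyj⟩ := hy
      have : y.1 = (j : Int) := by exact_mod_cast beq_iff_eq.mp hyj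
      rw [this, hxk]
      simp; omega
    case h2 =>
      intro y hy
      simp only [List.mem_flatMap, List.mem_map, List.mem_range, List.mem_filter] at hy
      obtain ⟨j, ⟨i, hi, rfl⟩, _, hyj⟩ := hy
      have : y.1 = ((k + 1 + i : Nat) : Int) := by exact_mod_cast beq_iff_eq.mp hyj
      rw [this, hxk]
      push_cast; omega
    have hfirst : (List.range (k+1)).flatMap (fun (j : Nat) => (M ++ [x]).filter (fun p => p.1 == (j : Int)))
        = (List.range (k+1)).flatMap (fun (j : Nat) => M.filter (fun p => p.1 == (j : Int))) ++ [x] := by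
      rw [List.range_succ, List.flatMap_append, List.flatMap_append]
      have hlt : ∀ j ∈ List.range k, (M ++ [x]).filter (fun p => p.1 == (j : Int))
          = M.filter (fun p => p.1 == (j : Int)) := by
        intro j hj
        rw [List.filter_append]
        have : (x.1 == (j : Int)) = false := by
          rw [hxk]; simp only [List.mem_range] at hj
          simp; omega
        simp [this]
      rw [List.flatMap_congr hlt]
      simp [hxk]
    have hsecond : ((List.range (n - (k+1))).map (fun i => (k+1) + i)).flatMap
          (fun (j : Nat) => (M ++ [x]).filter (fun p => p.1 == (j : Int)))
        = ((List.range (n - (k+1))).map (fun i => (k+1) + i)).flatMap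
          (fun (j : Nat) => M.filter (fun p => p.1 == (j : Int))) := by
      apply List.flatMap_congr
      intro j hj
      simp only [List.mem_map, List.mem_range] at hj
      obtain ⟨i, hi, rfl⟩ := hj
      rw [List.filter_append]
      simp only [hxk, List.filter_cons, List.filter_nil]
      simp
      omega
    rw [hfirst, hsecond, List.append_assoc]
    simp

-- the two dedup loops run in lockstep: A's pair list is B's list decorated with its key
lemma pv_loop_inv (oi : PySem.Dict String Int) (key : String → String) :
    ∀ (skills : List String) (accB : List String) (seen : PySem.Set String),
    (∀ s ∈ accB, (oi.get? (key s)).isSome) →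
    (skills.foldl (fun (st : List (Int × String) × PySem.Set String) skill =>
        match oi.get? (key skill) with
        | none => st
        | some idx => if st.2.contains skill then st else (st.1 ++ [(idx, skill)], st.2.add skill))
      (accB.map (fun s => ((oi.get? (key s)).getD 0, s)), seen)).1
      = ((skills.foldl (fun (st : List String × PySem.Set String) s =>
          if oi.contains (key s) && !(st.2.contains s) then (st.1 ++ [s], st.2.add s) else st)
        (accB, seen)).1).map (fun s => ((oi.get? (key s)).getD 0, s))
    ∧ (∀ s ∈ (skills.foldl (fun (st : List String × PySem.Set String) s =>
          if oi.contains (key s) && !(st.2.contains s) then (st.1 ++ [s], st.2.add s) else st)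
        (accB, seen)).1, (oi.get? (key s)).isSome) := by
  intro skills
  induction skills with
  | nil => intro accB seen hinv; exact ⟨rfl, hinv⟩
  | cons s rest ih =>
    intro accB seen hinv
    simp only [List.foldl_cons]
    rcases hidx : oi.get? (key s) with _ | idx
    · have hc : oi.contains (key s) = false := by rw [pv_contains_eq_isSome, hidx]; rfl
      simpa only [hidx, hc, Bool.false_and, Bool.false_eq_true, if_false] using ih accB seen hinv
    · have hc : oi.contains (key s) = true := by rw [pv_contains_eq_isSome, hidx]; rfl
      by_cases hseen : seen.contains s = true
      · simpa only [hidx, hc, hseen, Bool.not_true, Bool.and_false, Bool.false_eq_true, if_false,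
          if_true] using ih accB seen hinv
      · have hseen' : seen.contains s = false := by
          cases he : seen.contains s
          · rfl
          · exact absurd he hseen
        have hstep : (accB.map (fun s => ((oi.get? (key s)).getD 0, s))) ++ [(idx, s)]
            = (accB ++ [s]).map (fun s => ((oi.get? (key s)).getD 0, s)) := by
          simp [hidx]
        have hinv2 : ∀ t ∈ accB ++ [s], (oi.get? (key t)).isSome := by
          intro t ht
          rcases List.mem_append.mp ht with h | h
          · exact hinv t h
          · simp only [List.mem_singleton] at h; subst h; simp [hidx]
        simpa only [hidx, hc, hseen', Bool.not_false, Bool.and_true, Bool.true_and, if_true,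
          Bool.false_eq_true, if_false, hstep] using ih (accB ++ [s]) (seen.add s) hinv2

-- ===== VERDICT (by name: the statement is the Claim_ definition above) =====
theorem filter_skills_by_highlighted_py_spec : Claim_equal_filter_skills_by_highlighted_py := by
  intro skills hs ob _
  unfold Spec_filter_skills_by_highlighted_py filter_skills_by_highlighted_py
    filter_skills_by_highlighted_py_alt
  cases ob with
  | false =>
    simp only [if_true]
    simpa using PySem.List.foldl_append_if
      (fun skill => hs.contains (pvLabelToRaw.getD skill skill)) id skills []
  | true =>
    simp only [Bool.true_eq_false, if_false]
    obtain ⟨heq, hsome⟩ := pv_loop_inv (pvOrderIndex hs) (fun s => pvLabelToRaw.getD s s)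
      skills [] (PySem.Set.ofList []) (by simp)
    simp only [List.map_nil] at heq
    rw [heq]
    set L := ((skills.foldl (fun (st : List String × PySem.Set String) s =>
      if (pvOrderIndex hs).contains (pvLabelToRaw.getD s s) && !(st.2.contains s)
      then (st.1 ++ [s], st.2.add s) else st) ([], PySem.Set.ofList [])).1) with hL
    have hbound : ∀ p ∈ L.map (fun s => (((pvOrderIndex hs).get? (pvLabelToRaw.getD s s)).getD 0, s)),
        ∃ j : Nat, j < hs.length ∧ p.1 = (j : Int) := by
      intro p hp
      simp only [List.mem_map] at hp
      obtain ⟨s, hsL, rfl⟩ := hp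
      have := hsome s hsL
      rcases hv : (pvOrderIndex hs).get? (pvLabelToRaw.getD s s) with _ | v
      · rw [hv] at this; simp at this
      · obtain ⟨j, hj, hvj⟩ := pv_orderIndex_bound hs _ v hv
        exact ⟨j, hj, by simp [hvj]⟩
    rw [pv_sorted_buckets hs.length _ hbound, List.map_flatMap,
      PySem.List.pyRange_zero_natCast, List.flatMap_map]
    apply List.flatMap_congr
    intro j hj
    rw [List.filter_map, List.map_map]
    have : ((fun p => p.2) ∘ (fun s => (((pvOrderIndex hs).get? (pvLabelToRaw.getD s s)).getD 0, s)))
        = fun (s : String) => s := rfl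
    rw [this, List.map_id'']
    apply List.filter_congr
    intro s hsL
    have := hsome s hsL
    rcases hv : (pvOrderIndex hs).get? (pvLabelToRaw.getD s s) with _ | v
    · rw [hv] at this; simp at this
    · simp [hv]
    intro x
    rfl
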